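-- pv_equiv track=rewrite | github.com/shaoncvit/form_digitization_apis | asha_digitization_api/digitize.py | segment_words
-- ===== SOURCE A (Python) =====
-- def segment_words(bounding_boxes, ink_percentages):
-- 	word_segments = []
-- 	current_segment = []
--
-- 	for i, box in enumerate(bounding_boxes):
-- 		if i == 0:
-- 			current_segment.append(box)
-- 		else:
-- 			prev_box = bounding_boxes[i-1]
-- 			distance = box[0] - (prev_box[0] + prev_box[2])
--
-- 			if distance < 1 or distance >= 23:
-- 				if len(current_segment) > 0:
-- 					word_segments.append(current_segment)
-- 				current_segment = [box]
-- 			else: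
-- 				current_segment.append(box)
--
-- 	if current_segment:
-- 		word_segments.append(current_segment)
--
-- 	return word_segments
-- ===== SOURCE B (Python) =====
-- def segment_words(bounding_boxes, ink_percentages):
--     n = len(bounding_boxes)
--     if n == 0:
--         return []
--     # pass 1: gap distance before each box i (i = 1..n-1)
--     distances = [bounding_boxes[i][0] - (bounding_boxes[i - 1][0] + bounding_boxes[i - 1][2])
--                  for i in range(1, n)]
--     # pass 2: break indices: 0 always, plus every i whose gap is < 1 or >= 23; sentinel n
--     breaks = [0] + [i for i in range(1, n)
--                     if distances[i - 1] < 1 or distances[i - 1] >= 23] + [n]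
--     # pass 3: slice the box list between consecutive break indices
--     return [bounding_boxes[s:e] for s, e in zip(breaks, breaks[1:])]
-- ===== Notes on version B (the rewrite author's own statement) =====
-- stated objective: alternative
-- what changed: A's single stateful scan with a current_segment buffer and a final flush is replaced by three staged passes over the data: a list of gap distances between consecutive boxes, then the list of break indices (0, every index whose gap is < 1 or >= 23, and n), then slicing bounding_boxes between consecutive break indices.
import Mathlib
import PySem

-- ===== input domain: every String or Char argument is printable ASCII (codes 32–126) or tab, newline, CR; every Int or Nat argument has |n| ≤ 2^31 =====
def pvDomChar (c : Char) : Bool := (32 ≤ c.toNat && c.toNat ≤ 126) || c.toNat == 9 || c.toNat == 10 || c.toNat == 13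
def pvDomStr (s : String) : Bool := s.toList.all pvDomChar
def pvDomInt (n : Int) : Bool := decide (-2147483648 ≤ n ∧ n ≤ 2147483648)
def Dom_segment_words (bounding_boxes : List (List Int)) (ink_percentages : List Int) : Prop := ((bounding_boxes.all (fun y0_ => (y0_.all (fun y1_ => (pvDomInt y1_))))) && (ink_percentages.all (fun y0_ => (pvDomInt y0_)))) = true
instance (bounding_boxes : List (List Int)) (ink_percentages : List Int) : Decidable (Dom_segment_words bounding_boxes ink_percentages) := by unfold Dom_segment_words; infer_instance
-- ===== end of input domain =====

-- B replaces A's single stateful scan (current_segment buffer + final flush) by three staged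
-- passes: the gap-distance list, the break-index list, then slicing the box list between
-- consecutive break indices (objective: alternative decomposition, same cost).

-- ===== PORT A =====
-- one loop iteration of A (state = (word_segments, current_segment), item = (i, box))
def pvAStep (bounding_boxes : List (List Int))
    (st : List (List (List Int)) × List (List Int)) (ib : Int × List Int) :
    List (List (List Int)) × List (List Int) :=
  if ib.1 = 0 then (st.1, st.2 ++ [ib.2])
  else
    let prev_box := (PySem.List.pyGet? bounding_boxes (ib.1 - 1)).getD []
    let distance := (PySem.List.pyGet? ib.2 0).getD 0 -
      ((PySem.List.pyGet? prev_box 0).getD 0 + (PySem.List.pyGet? prev_box 2).getD 0)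
    if distance < 1 ∨ 23 ≤ distance then
      ((if st.2.length > 0 then st.1 ++ [st.2] else st.1), [ib.2])
    else (st.1, st.2 ++ [ib.2])

def segment_words (bounding_boxes : List (List Int)) (ink_percentages : List Int) : List (List (List Int)) :=
  let st := (PySem.List.enumerate bounding_boxes 0).foldl (pvAStep bounding_boxes) ([], [])
  if st.2 ≠ [] then st.1 ++ [st.2] else st.1

-- ===== PORT B =====
-- gap distance before box i (distances[i-1] of Source B)
def pvDist (bounding_boxes : List (List Int)) (i : Int) : Int :=
  let box := (PySem.List.pyGet? bounding_boxes i).getD []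
  let prev := (PySem.List.pyGet? bounding_boxes (i - 1)).getD []
  (PySem.List.pyGet? box 0).getD 0 -
    ((PySem.List.pyGet? prev 0).getD 0 + (PySem.List.pyGet? prev 2).getD 0)

def segment_words_alt (bounding_boxes : List (List Int)) (ink_percentages : List Int) : List (List (List Int)) :=
  let n : Int := bounding_boxes.length
  if n = 0 then []
  else
    -- pass 1: gap distances
    let distances := (PySem.List.pyRange 1 n 1).map (pvDist bounding_boxes)
    -- pass 2: break indices
    let breaks := [(0 : Int)] ++ (PySem.List.pyRange 1 n 1).filter (fun i =>
        decide ((PySem.List.pyGet? distances (i - 1)).getD 0 < 1 ∨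
                23 ≤ (PySem.List.pyGet? distances (i - 1)).getD 0)) ++ [n]
    -- pass 3: slices between consecutive breaks
    (breaks.zip (PySem.List.slice breaks (some 1) none)).map
      (fun se => PySem.List.slice bounding_boxes (some se.1) (some se.2))

-- ===== PRECONDITION & SPEC =====
-- Pre_ excludes exactly the inputs where both Pythons raise IndexError: with ≥ 2 boxes, every
-- box but the last needs at least 3 coordinates and every box but the first at least 1.
def Pre_segment_words (bounding_boxes : List (List Int)) (ink_percentages : List Int) : Prop :=
  ∀ i < bounding_boxes.length - 1,
    3 ≤ (bounding_boxes.getD i []).length ∧ 1 ≤ (bounding_boxes.getD (i + 1) []).length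
instance (bounding_boxes : List (List Int)) (ink_percentages : List Int) : Decidable (Pre_segment_words bounding_boxes ink_percentages) := by unfold Pre_segment_words; infer_instance

def pvWitness_segment_words : List (List Int) × List Int := ([[0, 0, 2], [10, 0, 5]], [])

def Spec_segment_words (bounding_boxes : List (List Int)) (ink_percentages : List Int) (out : List (List (List Int))) : Prop := out = segment_words_alt bounding_boxes ink_percentages
instance (bounding_boxes : List (List Int)) (ink_percentages : List Int) (out : List (List (List Int))) : Decidable (Spec_segment_words bounding_boxes ink_percentages out) := by unfold Spec_segment_words; infer_instance

-- ===== CLAIM (what is proved, stated in full; the proofs are below) =====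
def Claim_equal_segment_words : Prop := ∀ (bounding_boxes : List (List Int)) (ink_percentages : List Int), Dom_segment_words bounding_boxes ink_percentages → Pre_segment_words bounding_boxes ink_percentages → Spec_segment_words bounding_boxes ink_percentages (segment_words bounding_boxes ink_percentages)

-- ===== LEMMAS AND PROOFS =====

-- break flag of a consecutive pair (prev, cur) of boxes (proof-side)
def pvBrkFlag (ab : List Int × List Int) : Bool :=
  let d := (PySem.List.pyGet? ab.2 0).getD 0 -
    ((PySem.List.pyGet? ab.1 0).getD 0 + (PySem.List.pyGet? ab.1 2).getD 0)
  decide (d < 1 ∨ 23 ≤ d)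

-- one flag-driven grouping step (proof-side intermediate form between A and B)
def pvBStep (segs : List (List (List Int))) (bf : List Int × Bool) : List (List (List Int)) :=
  if bf.2 then segs ++ [[bf.1]]
  else segs.dropLast ++ [segs.getLastD [] ++ [bf.1]]

-- wrap of A's loop state: append the pending current segment
def pvWrap (st : List (List (List Int)) × List (List Int)) : List (List (List Int)) :=
  if st.2 ≠ [] then st.1 ++ [st.2] else st.1

-- B's break predicate (the port's filter lambda with distances spelled out)
def pvPred (bounding_boxes : List (List Int)) (i : Int) : Bool :=
  decide ((PySem.List.pyGet? ((PySem.List.pyRange 1 (bounding_boxes.length : Int) 1).map (pvDist bounding_boxes)) (i - 1)).getD 0 < 1 ∨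
          23 ≤ (PySem.List.pyGet? ((PySem.List.pyRange 1 (bounding_boxes.length : Int) 1).map (pvDist bounding_boxes)) (i - 1)).getD 0)

-- B's break-index list for the prefix of length m of bounding_boxes
def pvBreaks (bounding_boxes : List (List Int)) (m : Nat) : List Int :=
  (0 : Int) :: (PySem.List.pyRange 1 (m : Int) 1).filter (pvPred bounding_boxes) ++ [(m : Int)]

-- B's slicing pass applied to a break list
def pvSlices (bounding_boxes : List (List Int)) (breaks : List Int) : List (List (List Int)) :=
  (breaks.zip breaks.tail).map (fun se => PySem.List.slice bounding_boxes (some se.1) (some se.2))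

-- Loop correspondence for A: after the first box, A's state (ws, cur) with cur ≠ [] matches
-- the flag-fold state ws ++ [cur], where prev is the last consumed box.
lemma pv_loop_eq (bounding_boxes : List (List Int)) :
    ∀ (rest front : List (List Int)) (prev : List Int)
      (ws : List (List (List Int))) (cur : List (List Int)),
      cur ≠ [] → bounding_boxes = front ++ prev :: rest →
      pvWrap ((PySem.List.enumerate rest ((front.length : Int) + 1)).foldl
          (pvAStep bounding_boxes) (ws, cur))
      = (rest.zip (((prev :: rest).zip rest).map pvBrkFlag)).foldl pvBStep (ws ++ [cur]) := by
  intro rest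
  induction rest with
  | nil => intro front prev ws cur hcur _; simp [PySem.List.enumerate, pvWrap, hcur]
  | cons b rs ih =>
    intro front prev ws cur hcur hbb
    rw [PySem.List.enumerate_cons]
    simp only [List.zip_cons_cons, List.map_cons, List.foldl_cons]
    have hstep : pvAStep bounding_boxes (ws, cur) ((front.length : Int) + 1, b)
        = (if pvBrkFlag (prev, b) then (ws ++ [cur], [b]) else (ws, cur ++ [b])) := by
      have h0 : ((front.length : Int) + 1) ≠ 0 := by positivity
      have hprev : PySem.List.pyGet? bounding_boxes ((front.length : Int) + 1 - 1)
          = some prev := by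
        have : ((front.length : Int) + 1 - 1) = (front.length : Int) := by ring
        rw [this, hbb, PySem.List.pyGet?_append_length]
      simp only [pvAStep, pvBrkFlag, h0, if_false, hprev, Option.getD_some]
      by_cases hbrk : ((PySem.List.pyGet? b 0).getD 0 -
          ((PySem.List.pyGet? prev 0).getD 0 + (PySem.List.pyGet? prev 2).getD 0) < 1 ∨
          23 ≤ (PySem.List.pyGet? b 0).getD 0 -
          ((PySem.List.pyGet? prev 0).getD 0 + (PySem.List.pyGet? prev 2).getD 0)) <;>
        simp [hbrk, List.length_pos_iff, hcur]
    rw [hstep]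
    have hbb2 : bounding_boxes = (front ++ [prev]) ++ b :: rs := by simp [hbb]
    have hlen : (((front ++ [prev]).length : Int)) = (front.length : Int) + 1 := by simp
    rcases Bool.eq_false_or_eq_true (pvBrkFlag (prev, b)) with hfl | hfl
    · rw [hfl, if_pos rfl]
      have hih := ih (front ++ [prev]) b (ws ++ [cur]) [b] (by simp) hbb2
      rw [hlen] at hih
      rw [hih]
      simp [pvBStep]
    · rw [hfl, if_neg (by simp)]
      have hih := ih (front ++ [prev]) b ws (cur ++ [b]) (by simp) hbb2
      rw [hlen] at hih
      rw [hih]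
      simp [pvBStep]

lemma pv_zip_tail_snoc {α : Type} (d : α) :
    ∀ (ys : List α) (v : α), ys ≠ [] →
      (ys ++ [v]).zip ((ys ++ [v]).tail) = ys.zip ys.tail ++ [(ys.getLastD d, v)]
  | [], _, h => absurd rfl h
  | [a], v, _ => by simp
  | a :: b :: ys, v, _ => by
    have h := pv_zip_tail_snoc d (b :: ys) v (by simp)
    simp only [List.cons_append, List.tail_cons, List.zip_cons_cons] at h ⊢
    rw [h]
    simp

lemma pv_slice_snoc (xs : List (List Int)) (s : Int) (t : Nat) (x : List Int)
    (hs0 : 0 ≤ s) (hst : s ≤ (t : Int)) (hx : xs[t]? = some x) :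
    PySem.List.slice xs (some s) (some ((t : Int) + 1))
      = PySem.List.slice xs (some s) (some (t : Int)) ++ [x] := by
  have h1 : (0 : Int) ≤ (t : Int) + 1 := by omega
  have h0 : (0 : Int) ≤ (t : Int) := by omega
  rw [PySem.List.slice_toNat xs hs0 h1, PySem.List.slice_toNat xs hs0 h0]
  have ht1 : ((t : Int) + 1).toNat = t + 1 := by omega
  have ht0 : ((t : Int)).toNat = t := by omega
  rw [ht1, ht0, show t + 1 - s.toNat = (t - s.toNat) + 1 by omega, List.take_add_one]
  congr 1
  rw [List.getElem?_drop, show s.toNat + (t - s.toNat) = t by omega, hx]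
  rfl

lemma pv_slice_one (xs : List (List Int)) (t : Nat) (x : List Int) (hx : xs[t]? = some x) :
    PySem.List.slice xs (some (t : Int)) (some ((t : Int) + 1)) = [x] := by
  rw [pv_slice_snoc xs (t : Int) t x (by omega) (by omega) hx,
    PySem.List.slice_toNat xs (by omega) (by omega)]
  simp

lemma pv_breaks_mem (bounding_boxes : List (List Int)) (m : Nat) (s : Int)
    (hs : s ∈ pvBreaks bounding_boxes m) : 0 ≤ s ∧ s ≤ (m : Int) := by
  unfold pvBreaks at hs
  simp only [List.cons_append, List.mem_cons, List.mem_append, List.mem_filter] at hs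
  rcases hs with h | ⟨h, _⟩ | h | h
  · omega
  · have := (PySem.List.mem_pyRange_one).mp h
    omega
  · omega
  · simp at h

-- the central step lemma
lemma pv_step (bbs : List (List Int)) (m : Nat) (x : List Int)
    (hx : bbs[m + 1]? = some x) :
    pvSlices bbs (pvBreaks bbs (m + 2))
      = pvBStep (pvSlices bbs (pvBreaks bbs (m + 1))) (x, pvPred bbs ((m + 1 : Nat) : Int)) := by
  have hrange : PySem.List.pyRange 1 ((m + 2 : Nat) : Int) 1
      = PySem.List.pyRange 1 ((m + 1 : Nat) : Int) 1 ++ [((m + 1 : Nat) : Int)] := by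
    rw [show ((m + 2 : Nat) : Int) = ((m + 1 : Nat) : Int) + 1 by omega]
    exact PySem.List.pyRange_one_succ_right (by omega)
  unfold pvBreaks
  rw [hrange, List.filter_append, List.filter_cons, List.filter_nil]
  rcases Bool.eq_false_or_eq_true (pvPred bbs ((m + 1 : Nat) : Int)) with hfl | hfl
  case inr =>
    -- no break at m+1: extend the last slice
    have hfl2 : pvPred bbs ((m : Int) + 1) = false := by
      rwa [show ((m : Int) + 1) = ((m + 1 : Nat) : Int) by omega]
    rw [if_neg (by rw [hfl]; simp), List.append_nil]
    unfold pvSlices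
    set ys := (0 : Int) :: List.filter (pvPred bbs)
      (PySem.List.pyRange 1 ((m + 1 : Nat) : Int) 1) with hys
    have hys_ne : ys ≠ [] := by simp [hys]
    rw [pv_zip_tail_snoc (0 : Int) ys ((m + 2 : Nat) : Int) hys_ne,
        pv_zip_tail_snoc (0 : Int) ys ((m + 1 : Nat) : Int) hys_ne,
        List.map_append, List.map_append]
    simp only [List.map_cons, List.map_nil]
    set s := ys.getLastD 0 with hs
    have hsmem : s ∈ ys := by
      rw [hs, List.getLastD_eq_getLast?, List.getLast?_eq_some_getLast hys_ne]
      exact List.getLast_mem hys_ne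
    have hsb : 0 ≤ s ∧ s ≤ ((m + 1 : Nat) : Int) := by
      refine pv_breaks_mem bbs (m + 1) s ?_
      unfold pvBreaks
      rw [hys] at hsmem
      simp only [List.mem_cons] at hsmem
      simp only [List.cons_append, List.mem_cons, List.mem_append]
      rcases hsmem with h | h
      · exact Or.inl h
      · exact Or.inr (Or.inl h)
    rw [show ((m + 2 : Nat) : Int) = (((m + 1 : Nat) : Int)) + 1 by omega,
        pv_slice_snoc bbs s (m + 1) x hsb.1 hsb.2 hx]
    simp only [pvBStep, hfl, Bool.false_eq_true, if_false, List.dropLast_concat,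
      List.getLastD_concat]
  case inl =>
    -- break at m+1: append the singleton slice [x]
    have hfl2 : pvPred bbs ((m : Int) + 1) = true := by
      rwa [show ((m : Int) + 1) = ((m + 1 : Nat) : Int) by omega]
    rw [if_pos hfl]
    unfold pvSlices
    set ys := (0 : Int) :: (List.filter (pvPred bbs)
      (PySem.List.pyRange 1 ((m + 1 : Nat) : Int) 1) ++ [((m + 1 : Nat) : Int)]) with hys
    have hys_ne : ys ≠ [] := by simp [hys]
    rw [pv_zip_tail_snoc (0 : Int) ys ((m + 2 : Nat) : Int) hys_ne, List.map_append]
    have hlast : ys.getLastD 0 = ((m + 1 : Nat) : Int) := by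
      rw [hys, show (0 : Int) :: (List.filter (pvPred bbs) (PySem.List.pyRange 1 ((m + 1 : Nat) : Int) 1) ++ [((m + 1 : Nat) : Int)]) = ((0 : Int) :: List.filter (pvPred bbs) (PySem.List.pyRange 1 ((m + 1 : Nat) : Int) 1)) ++ [((m + 1 : Nat) : Int)] by simp]
      exact List.getLastD_concat
    rw [hlast]
    simp only [List.map_cons, List.map_nil]
    rw [show ((m + 2 : Nat) : Int) = (((m + 1 : Nat) : Int)) + 1 by omega,
        pv_slice_one bbs (m + 1) x hx]
    simp only [pvBStep, hfl, if_true]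
    rw [hys]
    simp

-- evaluating B's break predicate at the index of box x (prefix b :: rs, then x)
lemma pv_pred_eval (b x : List Int) (rs tail : List (List Int)) :
    pvPred (b :: rs ++ x :: tail) ((rs.length + 1 : Nat) : Int)
      = pvBrkFlag ((b :: rs).getLastD [], x) := by
  have hm : ((rs.length + 1 : Nat) : Int) - 1 = ((rs.length : Nat) : Int) := by omega
  have hrange : rs.length < ((((b :: rs ++ x :: tail).length : Int)) - 1).toNat := by
    simp
  unfold pvPred
  rw [hm]
  have hget := PySem.List.pyGetD_map_pyRange_one (pvDist (b :: rs ++ x :: tail)) 1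
      ((b :: rs ++ x :: tail).length : Int) rs.length 0 hrange
  simp only [PySem.List.pyGetD] at hget
  rw [hget]
  have hx : PySem.List.pyGet? (b :: rs ++ x :: tail) (1 + (rs.length : Int)) = some x := by
    rw [show (1 + (rs.length : Int)) = (((b :: rs).length : Nat) : Int) by simp; omega,
      show (b :: rs ++ x :: tail) = (b :: rs) ++ x :: tail by simp,
      PySem.List.pyGet?_append_length]
  have hprev : PySem.List.pyGet? (b :: rs ++ x :: tail) (1 + (rs.length : Int) - 1)
      = some ((b :: rs).getLastD []) := by
    rw [show (1 + (rs.length : Int) - 1) = ((rs.length : Nat) : Int) by omega,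
      PySem.List.pyGet?_natCast,
      show (b :: rs ++ x :: tail) = (b :: rs) ++ x :: tail by simp]
    have hlen : rs.length < (b :: rs).length := by simp
    rw [List.getElem?_append_left hlen, List.getElem?_eq_getElem hlen,
      List.getLastD_eq_getLast?, List.getLast?_eq_getElem?]
    simp
    rfl
  unfold pvDist pvBrkFlag
  rw [hx, hprev]
  simp

-- the flag-fold over the consumed boxes equals B's slices of its break list
lemma pv_fold_eq_slices (b : List Int) :
    ∀ (mid tail : List (List Int)),
      (mid.zip (((b :: mid).zip mid).map pvBrkFlag)).foldl pvBStep [[b]]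
        = pvSlices (b :: mid ++ tail) (pvBreaks (b :: mid ++ tail) (mid.length + 1)) := by
  intro mid
  induction mid using List.reverseRecOn with
  | nil =>
    intro tail
    unfold pvSlices pvBreaks
    simp only [List.length_nil, List.zip_nil_right, List.map_nil, List.foldl_nil,
      Nat.zero_add, Nat.cast_one]
    rw [show PySem.List.pyRange 1 1 1 = [] by rw [PySem.List.pyRange_one]; norm_num]
    simp only [List.singleton_append, List.filter_nil, List.zip_cons_cons,
      List.tail_cons, List.zip_nil_right, List.map_cons, List.map_nil]
    rw [PySem.List.slice_toNat (b :: tail) (le_refl 0) (by norm_num)]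
    simp
  | append_singleton rs x ih =>
    intro tail
    have hlist : b :: (rs ++ [x]) ++ tail = b :: rs ++ x :: tail := by simp
    have hm : (rs ++ [x]).length + 1 = rs.length + 2 := by simp
    rw [hlist, hm]
    have hflags : ((b :: (rs ++ [x])).zip (rs ++ [x])).map pvBrkFlag
        = (((b :: rs).zip rs).map pvBrkFlag) ++ [pvBrkFlag ((b :: rs).getLastD [], x)] := by
      have h := pv_zip_tail_snoc ([] : List Int) (b :: rs) x (by simp)
      simp only [List.cons_append, List.tail_cons] at h
      rw [h, List.map_append]
      simp
    have hlen : rs.length = (((b :: rs).zip rs).map pvBrkFlag).length := by simp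
    rw [hflags, List.zip_append hlen, List.foldl_append]
    rw [ih (x :: tail)]
    have hx : (b :: rs ++ x :: tail)[rs.length + 1]? = some x := by
      rw [show b :: rs ++ x :: tail = (b :: rs) ++ x :: tail by simp,
        List.getElem?_append_right (by simp)]
      simp
    rw [pv_step (b :: rs ++ x :: tail) rs.length x hx]
    simp only [List.zip_cons_cons, List.foldl_cons]
    rw [pv_pred_eval b x rs tail]
    simp

-- A = B on every input
lemma pv_main (bounding_boxes : List (List Int)) (ink_percentages : List Int) :
    segment_words bounding_boxes ink_percentages
      = segment_words_alt bounding_boxes ink_percentages := by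
  cases bounding_boxes with
  | nil => rfl
  | cons b rest =>
    show pvWrap ((PySem.List.enumerate (b :: rest) 0).foldl (pvAStep (b :: rest)) ([], []))
      = segment_words_alt (b :: rest) ink_percentages
    have halt : segment_words_alt (b :: rest) ink_percentages
        = pvSlices (b :: rest) (pvBreaks (b :: rest) (rest.length + 1)) := by
      simp only [segment_words_alt, pvSlices, pvBreaks, PySem.List.slice_from_one]
      rw [if_neg (by simp only [List.length_cons]; omega)]
      simp only [List.cons_append, List.nil_append, List.tail_cons, List.length_cons]
      norm_cast
    rw [halt]
    rw [PySem.List.enumerate_cons]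
    simp only [List.foldl_cons]
    have h0 : pvAStep (b :: rest) (([], []) : List (List (List Int)) × List (List Int)) (0, b)
        = ([], [b]) := by simp [pvAStep]
    rw [h0, show ((0 : Int) + 1) = ((([] : List (List Int)).length : Int) + 1) by simp]
    rw [pv_loop_eq (b :: rest) rest [] b [] [b] (by simp) (by simp)]
    have h := pv_fold_eq_slices b rest []
    simpa using h

-- ===== VERDICT (by name: the statement is the Claim_ definition above) =====
theorem segment_words_spec : Claim_equal_segment_words := by
  intro bbs ink _ _
  unfold Spec_segment_words
  exact pv_main bbs ink
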